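-- pv_equiv track=rewrite | github.com/chembl/chembl_webservices_2 | chembl_webservices/core/resource.py | normalise_filters
-- ===== SOURCE A (Python) =====
-- def normalise_filters(applicable_filters):
--     if not applicable_filters:
--         return []
--     for key in applicable_filters:
--         if not (isinstance(applicable_filters[key], list) or isinstance(applicable_filters[key], tuple)) or \
--                 key.endswith('__in') or key.endswith('__range'):
--             applicable_filters[key] = [applicable_filters[key]]
--     # reserve as much *distinct* dicts as the longest sequence
--     result = [{} for i in range(max(map(len, applicable_filters.values())))]
--     # fill each dict, one key at a time
--     for k, seq in applicable_filters.items():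
--         for oneDict, oneValue in zip(result, seq):
--             oneDict[k] = oneValue
--     return result
-- ===== SOURCE B (Python) =====
-- def normalise_filters(applicable_filters):
--     if not applicable_filters:
--         return []
--     # same in-place normalization as the original (mutates the argument identically)
--     for key in applicable_filters:
--         value = applicable_filters[key]
--         if not isinstance(value, (list, tuple)) or \
--                 key.endswith('__in') or key.endswith('__range'):
--             applicable_filters[key] = [value]
--     max_len = max(len(seq) for seq in applicable_filters.values())
--     # build the result row-by-row: one complete dict per index
--     return [{k: seq[i] for k, seq in applicable_filters.items() if i < len(seq)}
--             for i in range(max_len)]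
-- ===== Notes on version B (the rewrite author's own statement) =====
-- stated objective: alternative
-- what changed: Instead of preallocating one empty dict per index and scattering each key column-by-column via zip into those mutable dicts, B computes the maximum sequence length and builds each output dict row-by-row with a comprehension guarded by i < len(seq); the in-place normalization loop is kept so the argument mutation matches.
-- outside the precondition, e.g. on normalise_filters({'a__in': ['x', 'y']}): A returns [{'a__in': ['x', 'y']}], B returns [{'a__in': ['x', 'y']}]
import Mathlib
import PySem

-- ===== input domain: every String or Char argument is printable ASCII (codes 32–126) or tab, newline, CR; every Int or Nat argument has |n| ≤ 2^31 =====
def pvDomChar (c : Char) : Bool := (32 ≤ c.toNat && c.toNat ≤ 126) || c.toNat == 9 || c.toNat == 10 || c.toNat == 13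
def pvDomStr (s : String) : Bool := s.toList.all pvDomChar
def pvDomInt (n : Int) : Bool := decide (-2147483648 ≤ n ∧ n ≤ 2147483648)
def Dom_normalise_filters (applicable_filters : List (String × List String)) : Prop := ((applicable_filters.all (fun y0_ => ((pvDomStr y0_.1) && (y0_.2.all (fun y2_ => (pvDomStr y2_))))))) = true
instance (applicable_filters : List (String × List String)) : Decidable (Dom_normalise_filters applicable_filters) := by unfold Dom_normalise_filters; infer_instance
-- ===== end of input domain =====

-- B builds the result row-by-row (one dict per index, via max length + guarded comprehension)
-- instead of A's column-by-column zip-scatter into preallocated dicts; same in-place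
-- normalization of the argument in Python, so mutation matches; equivalence is about the return value.


-- shared dict-cell primitive: Python's `d[k] = v` on an insertion-ordered dict
-- (overwrite in place, new keys append) — exact
def dictInsert (d : List (String × String)) (k v : String) : List (String × String) :=
  match d with
  | [] => [(k, v)]
  | (k', v') :: rest => if k' == k then (k', v) :: rest else (k', v') :: dictInsert rest k v

-- ===== PORT A =====
-- A's first for-loop: values are typed List String, so the isinstance test is always true;
-- a key ending '__in'/'__range' would wrap the list into a non-string value (not of the
-- declared output type) — those inputs are excluded by Pre_, under which the loop is the identity.
def normalise_filters (applicable_filters : List (String × List String)) : List (List (String × String)) :=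
  if applicable_filters.isEmpty then []
  else
    -- result = [{} for i in range(max(map(len, values)))]
    let result : List (List (String × String)) :=
      (List.range ((applicable_filters.map (fun p => p.2.length)).foldl Nat.max 0)).map (fun _ => [])
    -- for k, seq in items: for oneDict, oneValue in zip(result, seq): oneDict[k] = oneValue
    applicable_filters.foldl
      (fun res p =>
        ((res.zip p.2).map (fun q => dictInsert q.1 p.1 q.2)) ++ res.drop p.2.length)
      result

-- ===== PORT B =====
-- the same normalization loop is the identity under Pre_ (see comment on PORT A)
def normalise_filters_alt (applicable_filters : List (String × List String)) : List (List (String × String)) :=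
  if applicable_filters.isEmpty then []
  else
    let maxLen := (applicable_filters.map (fun p => p.2.length)).foldl Nat.max 0
    (List.range maxLen).map (fun i =>
      applicable_filters.foldl
        (fun d p => match p.2[i]? with | some v => dictInsert d p.1 v | none => d) [])

-- ===== PRECONDITION & SPEC =====
-- Pre_ excludes inputs with a key ending '__in' or '__range': there A wraps the (list) value
-- into a one-element list, so the result dicts hold list values, not values of the declared
-- output type List (String × String).
def Pre_normalise_filters (applicable_filters : List (String × List String)) : Prop :=
  applicable_filters.all
    (fun p => !(PySem.Str.endswith p.1 "__in") && !(PySem.Str.endswith p.1 "__range")) = true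
instance (applicable_filters : List (String × List String)) : Decidable (Pre_normalise_filters applicable_filters) := by unfold Pre_normalise_filters; infer_instance

def pvWitness_normalise_filters : (List (String × List String)) :=
  [("a", ["x", "y"]), ("b", ["z"])]

def Spec_normalise_filters (applicable_filters : List (String × List String)) (out : List (List (String × String))) : Prop := out = normalise_filters_alt applicable_filters
instance (applicable_filters : List (String × List String)) (out : List (List (String × String))) : Decidable (Spec_normalise_filters applicable_filters out) := by unfold Spec_normalise_filters; infer_instance

-- ===== CLAIM (what is proved, stated in full; the proofs are below) =====
def Claim_equal_normalise_filters : Prop := ∀ (applicable_filters : List (String × List String)), Dom_normalise_filters applicable_filters → Pre_normalise_filters applicable_filters → Spec_normalise_filters applicable_filters (normalise_filters applicable_filters)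

-- ===== LEMMAS AND PROOFS =====

-- one column step of A, one row step of B (proof-only abbreviations)
def stepA (res : List (List (String × String))) (p : String × List String) : List (List (String × String)) :=
  ((res.zip p.2).map (fun q => dictInsert q.1 p.1 q.2)) ++ res.drop p.2.length

def stepB (i : Nat) (d : List (String × String)) (p : String × List String) : List (String × String) :=
  match p.2[i]? with | some v => dictInsert d p.1 v | none => d

theorem stepA_getElem? (res : List (List (String × String))) (p : String × List String) (i : Nat) :
    (stepA res p)[i]? = (res[i]?).map (fun d => stepB i d p) := by
  unfold stepA stepB
  rcases lt_or_ge i (min res.length p.2.length) with h | h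
  · have h1 : i < ((res.zip p.2).map (fun q => dictInsert q.1 p.1 q.2)).length := by
      simp; omega
    rw [List.getElem?_append_left h1]
    have hr : i < res.length := by omega
    have hs : i < p.2.length := by omega
    simp [hr, hs, List.getElem_zip]
  · have h1 : ((res.zip p.2).map (fun q => dictInsert q.1 p.1 q.2)).length ≤ i := by
      simp; omega
    rw [List.getElem?_append_right h1]
    simp only [List.length_map, List.length_zip] at h1 ⊢
    rcases lt_or_ge i res.length with hr | hr
    · -- i < res.length, so p.2.length ≤ i : element comes from the drop part, row step is a no-op
      have hs : p.2.length ≤ i := by omega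
      have hnone : p.2[i]? = none := List.getElem?_eq_none (by omega)
      rw [List.getElem?_drop]
      have : min res.length p.2.length = p.2.length := by omega
      simp [this, hnone, Nat.add_sub_cancel' hs, hr]
    · -- i past the whole result: both sides none
      have : res[i]? = none := by simp; omega
      rw [this]
      simp
      omega

theorem foldl_stepA_getElem? (af : List (String × List String))
    (res : List (List (String × String))) (i : Nat) :
    (af.foldl stepA res)[i]? = (res[i]?).map (fun d => af.foldl (stepB i) d) := by
  induction af generalizing res with
  | nil => simp [List.foldl]
  | cons p af ih =>
    simp only [List.foldl_cons]
    rw [ih, stepA_getElem?]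
    cases res[i]? <;> simp

-- ===== VERDICT (by name: the statement is the Claim_ definition above) =====
theorem normalise_filters_spec : Claim_equal_normalise_filters := by
  intro af _ _
  unfold Spec_normalise_filters normalise_filters normalise_filters_alt
  by_cases h : af.isEmpty
  · simp [h]
  · rw [if_neg h, if_neg h]
    set m := (af.map (fun p => p.2.length)).foldl Nat.max 0 with hm
    apply List.ext_getElem?
    intro i
    have hA : (af.foldl
        (fun res p => ((res.zip p.2).map (fun q => dictInsert q.1 p.1 q.2)) ++ res.drop p.2.length)
        ((List.range m).map (fun _ => [])))[i]?
        = (((List.range m).map (fun _ => ([] : List (String × String))))[i]?).map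
            (fun d => af.foldl (stepB i) d) := by
      exact foldl_stepA_getElem? af _ i
    rw [hA]
    rcases lt_or_ge i m with hi | hi
    · simp only [List.getElem?_map, List.getElem?_range, hi, Option.map_some]
      rfl
    · have h1 : (((List.range m).map (fun _ => ([] : List (String × String))))[i]?) = none := by
        simp; omega
      have h2 : (((List.range m).map (fun i =>
          af.foldl (fun d p => match p.2[i]? with | some v => dictInsert d p.1 v | none => d) []))[i]?) = none := by
        simp; omega
      rw [h1, h2]; rfl
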